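-- pv_equiv track=rewrite | github.com/jszheng/PySnippet | clock_diff.py | common_list
-- ===== SOURCE A (Python) =====
-- def common_list(l1, l2):
--     r = []
--     for i in l1:
--         r.append(i)
--         if i in l2:
--             l2.remove(i)
--     for i in l2:
--         r.append(i)
--     return r
-- ===== SOURCE B (Python) =====
-- def common_list(l1, l2):
--     # Count how many removals each value from l1 is entitled to, then make
--     # a single pass over l2 skipping elements while their quota lasts.
--     # (A mutates its argument l2 in place; B does not - return values agree.)
--     quota = {}
--     for i in l1:
--         quota[i] = quota.get(i, 0) + 1
--     rest = []
--     for i in l2: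
--         if quota.get(i, 0) > 0:
--             quota[i] = quota[i] - 1
--         else:
--             rest.append(i)
--     return l1 + rest
-- ===== Notes on version B (the rewrite author's own statement) =====
-- stated objective: faster
-- what changed: Replaces A's per-element 'i in l2' scan and list.remove (quadratic, and mutating l2) by a counter built from l1 once and a single pass over l2 that skips each value while its quota lasts; return values are identical (B does not mutate l2).
import Mathlib
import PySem

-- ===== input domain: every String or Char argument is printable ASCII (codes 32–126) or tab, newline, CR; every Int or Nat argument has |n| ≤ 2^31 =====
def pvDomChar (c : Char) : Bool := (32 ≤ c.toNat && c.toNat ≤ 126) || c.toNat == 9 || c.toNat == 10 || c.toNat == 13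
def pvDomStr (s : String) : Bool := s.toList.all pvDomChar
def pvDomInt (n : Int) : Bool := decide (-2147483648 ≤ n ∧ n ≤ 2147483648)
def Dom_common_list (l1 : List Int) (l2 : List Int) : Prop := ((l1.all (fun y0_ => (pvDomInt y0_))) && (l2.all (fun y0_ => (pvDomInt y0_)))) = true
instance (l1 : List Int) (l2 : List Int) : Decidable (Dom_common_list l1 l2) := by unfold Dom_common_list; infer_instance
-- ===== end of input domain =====

-- B replaces A's per-element 'i in l2' scan + list.remove by a counter from l1 and a
-- single pass over l2 (faster); equivalence is about the RETURN value only: A empties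
-- common elements out of its argument l2 in place, B does not mutate.

-- ===== PORT A =====
def common_list (l1 : List Int) (l2 : List Int) : List Int :=
  -- first loop: r.append(i); if i in l2: l2.remove(i)   (state = (r, l2))
  let s := l1.foldl (fun (s : List Int × List Int) i =>
    let r := s.1 ++ [i]
    if s.2.contains i then (r, (PySem.List.remove? s.2 i).getD s.2) else (r, s.2)) ([], l2)
  -- second loop: for i in l2: r.append(i)
  s.2.foldl (fun r i => r ++ [i]) s.1

-- ===== PORT B =====
def common_list_alt (l1 : List Int) (l2 : List Int) : List Int :=
  -- quota[i] = quota.get(i, 0) + 1 over l1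
  let quota := l1.foldl (fun (d : PySem.Dict Int Int) i => d.insert i (d.getD i 0 + 1)) PySem.Dict.empty
  -- single pass over l2: skip while quota lasts, else append to rest (state = (quota, rest))
  let s := l2.foldl (fun (s : PySem.Dict Int Int × List Int) i =>
    if s.1.getD i 0 > 0 then (s.1.insert i (s.1.getD i 0 - 1), s.2)
    else (s.1, s.2 ++ [i])) (quota, [])
  l1 ++ s.2

-- ===== PRECONDITION & SPEC =====
def Spec_common_list (l1 : List Int) (l2 : List Int) (out : List Int) : Prop := out = common_list_alt l1 l2
instance (l1 : List Int) (l2 : List Int) (out : List Int) : Decidable (Spec_common_list l1 l2 out) := by unfold Spec_common_list; infer_instance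

-- ===== CLAIM (what is proved, stated in full; the proofs are below) =====
def Claim_equal_common_list : Prop := ∀ (l1 : List Int) (l2 : List Int), Dom_common_list l1 l2 → Spec_common_list l1 l2 (common_list l1 l2)

-- ===== LEMMAS AND PROOFS =====

-- Reference function: drop from l the first (c v) occurrences of each value v.
def omitC (c : Int → Int) : List Int → List Int
  | [] => []
  | i :: l => if 0 < c i then omitC (fun v => if v = i then c i - 1 else c v) l
              else i :: omitC c l

-- A's single removal step on l2.
def remA (i : Int) (l2 : List Int) : List Int :=
  if l2.contains i then (PySem.List.remove? l2 i).getD l2 else l2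

-- A's whole first loop effect on l2.
def removeAll (l1 l2 : List Int) : List Int := l1.foldl (fun l2 i => remA i l2) l2

theorem remA_nil (i : Int) : remA i [] = [] := rfl

theorem remA_cons_self (i : Int) (l : List Int) : remA i (i :: l) = l := by
  simp [remA, PySem.List.remove?_cons_self]

theorem remA_cons_ne (i j : Int) (h : j ≠ i) (l : List Int) :
    remA i (j :: l) = j :: remA i l := by
  by_cases hm : i ∈ l
  · rw [remA, remA, if_pos (by simp [hm]), if_pos (by simp [hm]),
        PySem.List.remove?_cons_of_ne l h,
        PySem.List.remove?_eq_some_erase l i hm]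
    simp
  · rw [remA, remA, if_neg (by simp [Ne.symm h, hm]), if_neg (by simp [hm])]

-- omitC does not look at values outside the list, and only changes c inside it.
theorem omitC_congr (c c' : Int → Int) (l : List Int)
    (h : ∀ v ∈ l, c v = c' v) : omitC c l = omitC c' l := by
  induction l generalizing c c' with
  | nil => rfl
  | cons i l ih =>
    have hi : c i = c' i := h i (by simp)
    by_cases hp : 0 < c i
    · rw [omitC, omitC, if_pos hp, if_pos (hi ▸ hp)]
      exact ih _ _ (fun v hv => by by_cases hvi : v = i <;> simp [hvi, hi, h v (by simp [hv])])
    · rw [omitC, omitC, if_neg hp, if_neg (hi ▸ hp)]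
      exact (ih _ _ (fun v hv => h v (by simp [hv]))) ▸ rfl

theorem omitC_of_nonpos (c : Int → Int) (l : List Int) (h : ∀ v, c v ≤ 0) :
    omitC c l = l := by
  induction l generalizing c with
  | nil => rfl
  | cons i l ih =>
    rw [omitC, if_neg (by exact not_lt.mpr (h i))]
    exact congrArg _ (ih c h)

-- Key step: bumping the quota of i by one equals removing i's first occurrence first.
theorem omitC_bump (l2 : List Int) (c : Int → Int) (i : Int) (hci : 0 ≤ c i) :
    omitC (fun v => if v = i then c i + 1 else c v) l2 = omitC c (remA i l2) := by
  induction l2 generalizing c with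
  | nil => rw [remA_nil]; rfl
  | cons j l2 ih =>
    by_cases hji : j = i
    · subst hji
      rw [remA_cons_self, omitC, if_pos (by simp; omega)]
      simp only [ite_true]
      exact omitC_congr _ _ _ (fun v _ => by by_cases hv : v = j <;> simp [hv])
    · rw [remA_cons_ne i j hji]
      by_cases hp : 0 < c j
      · rw [omitC, if_pos (by simp [hji, hp]), omitC, if_pos hp]
        simp only [if_neg hji]
        have := ih (fun v => if v = j then c j - 1 else c v)
          (by simp [Ne.symm hji]; exact hci)
        rw [← this]
        exact omitC_congr _ _ _ (fun v _ => by
          by_cases hvj : v = j <;> by_cases hvi : v = i <;>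
            simp_all)
      · rw [omitC, if_neg (by simp [hji]; omega), omitC, if_neg hp]
        exact congrArg _ (ih c hci)

-- A's first loop removes, per value v, the first (l1.count v) occurrences from l2.
theorem removeAll_eq_omitC (l1 l2 : List Int) :
    removeAll l1 l2 = omitC (fun v => (l1.count v : Int)) l2 := by
  induction l1 generalizing l2 with
  | nil =>
    rw [removeAll, List.foldl_nil,
        omitC_of_nonpos _ _ (fun v => by simp)]
  | cons i l1 ih =>
    rw [removeAll, List.foldl_cons, ← removeAll, ih,
        ← omitC_bump _ _ i (by positivity)]
    exact omitC_congr _ _ _ (fun v _ => by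
      by_cases hv : v = i <;> simp [hv, List.count_cons] <;> push_cast <;> omega)

-- A's first loop: r accumulates l1, l2 becomes removeAll l1 l2.
theorem foldA_eq (l1 : List Int) (r0 l2 : List Int) :
    l1.foldl (fun (s : List Int × List Int) i =>
      let r := s.1 ++ [i]
      if s.2.contains i then (r, (PySem.List.remove? s.2 i).getD s.2) else (r, s.2)) (r0, l2)
    = (r0 ++ l1, removeAll l1 l2) := by
  induction l1 generalizing r0 l2 with
  | nil => simp [removeAll]
  | cons i l1 ih =>
    rw [List.foldl_cons]
    have h2 : removeAll (i :: l1) l2 = removeAll l1 (remA i l2) := rfl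
    by_cases h : l2.contains i
    · rw [if_pos h, ih, h2, remA, if_pos h]; simp
    · rw [if_neg h, ih, h2, remA, if_neg h]; simp

theorem foldl_append_singleton (l r0 : List Int) :
    l.foldl (fun r i => r ++ [i]) r0 = r0 ++ l := by
  induction l generalizing r0 with
  | nil => simp
  | cons i l ih => simp [List.foldl_cons, ih]

-- B's pass over l2: rest = omitC of the quota's getD.
theorem foldB_eq (l2 : List Int) (d : PySem.Dict Int Int) (acc : List Int) :
    (l2.foldl (fun (s : PySem.Dict Int Int × List Int) i =>
      if s.1.getD i 0 > 0 then (s.1.insert i (s.1.getD i 0 - 1), s.2)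
      else (s.1, s.2 ++ [i])) (d, acc)).2
    = acc ++ omitC (fun v => d.getD v 0) l2 := by
  induction l2 generalizing d acc with
  | nil => simp [omitC]
  | cons i l2 ih =>
    by_cases hp : 0 < d.getD i 0
    · rw [List.foldl_cons, if_pos hp, ih, omitC, if_pos hp]
      congr 1
      exact omitC_congr _ _ _ (fun v _ => by
        by_cases hv : v = i <;> simp [PySem.Dict.getD_insert, hv])
    · rw [List.foldl_cons, if_neg hp, ih, omitC, if_neg hp]
      simp

-- ===== VERDICT (by name: the statement is the Claim_ definition above) =====
theorem common_list_spec : Claim_equal_common_list := by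
  intro l1 l2 _
  show common_list l1 l2 = common_list_alt l1 l2
  rw [common_list, common_list_alt, foldA_eq, foldl_append_singleton,
      PySem.Dict.foldl_insert_getD_add_one_eq_counter, foldB_eq,
      removeAll_eq_omitC, List.nil_append]
  congr 1
  exact omitC_congr _ _ _ (fun v _ => by simp [PySem.Dict.getD_counter])
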